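-- pv_equiv track=rewrite | github.com/AdisonCavani/pp1 | 12-Test3/mock1/p7.py | f
-- ===== SOURCE A (Python) =====
-- def f(arr2D: list):
--   sum_arr = []
--
--   for arr in arr2D:
--     arr = list(arr)
--     sum = 0
--
--     for num in arr:
--       sum += num
--
--     sum_arr.append(sum)
--
--   for sum in sum_arr:
--     if sum_arr.count(sum) > 1:
--       return True
--
--   return False
-- ===== SOURCE B (Python) =====
-- def f(arr2D: list):
--   seen = set()
--   for row in arr2D:
--     s = sum(row)
--     if s in seen:
--       return True
--     seen.add(s)
--   return False
-- ===== Notes on version B (the rewrite author's own statement) =====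
-- stated objective: faster
-- what changed: Replaces the two-phase build-then-rescan with count() by a single pass that hashes each row sum into a set and returns True on the first repeat.
import Mathlib
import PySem

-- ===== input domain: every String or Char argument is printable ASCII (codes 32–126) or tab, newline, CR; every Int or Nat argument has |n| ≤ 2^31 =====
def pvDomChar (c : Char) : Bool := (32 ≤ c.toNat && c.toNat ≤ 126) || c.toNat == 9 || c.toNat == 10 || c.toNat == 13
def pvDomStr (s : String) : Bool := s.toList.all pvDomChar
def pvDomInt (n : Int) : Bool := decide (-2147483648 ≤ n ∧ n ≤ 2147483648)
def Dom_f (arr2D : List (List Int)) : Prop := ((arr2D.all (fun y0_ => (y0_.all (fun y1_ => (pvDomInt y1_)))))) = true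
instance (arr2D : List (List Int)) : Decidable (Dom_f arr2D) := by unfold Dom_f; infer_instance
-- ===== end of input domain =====

-- B replaces A's quadratic count()-rescan by one pass that records row sums in a set and stops at the first repeat (faster).


-- ===== PORT A =====
def f (arr2D : List (List Int)) : Bool :=
  let sum_arr := arr2D.foldl (fun sa arr => sa ++ [arr.foldl (fun s num => s + num) 0]) []
  -- 'for sum in sum_arr: if sum_arr.count(sum) > 1: return True' / 'return False'
  sum_arr.any (fun s => decide (1 < PySem.List.count sum_arr s))

-- ===== PORT B =====
def fAltGo (seen : List Int) : List (List Int) → Bool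
  | [] => false
  | row :: rest =>
    let s := row.foldl (fun a num => a + num) 0   -- sum(row)
    if PySem.Set.contains seen s then true
    else fAltGo (PySem.Set.add seen s) rest

def f_alt (arr2D : List (List Int)) : Bool := fAltGo PySem.Set.empty arr2D

-- ===== PRECONDITION & SPEC =====
def Spec_f (arr2D : List (List Int)) (out : Bool) : Prop := out = f_alt arr2D
instance (arr2D : List (List Int)) (out : Bool) : Decidable (Spec_f arr2D out) := by unfold Spec_f; infer_instance

-- ===== CLAIM (what is proved, stated in full; the proofs are below) =====
def Claim_equal_f : Prop := ∀ (arr2D : List (List Int)), Dom_f arr2D → Spec_f arr2D (f arr2D)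

-- ===== LEMMAS AND PROOFS =====

-- the per-row sum both ports compute
def rsum (r : List Int) : Int := List.foldl (fun a num => a + num) 0 r

-- A's scan returns True iff some sum occurs more than once, i.e. iff the list is not Nodup.
theorem any_count_gt_one (l : List Int) :
    (l.any fun s => decide (1 < PySem.List.count l s)) = !decide l.Nodup := by
  by_cases h : l.Nodup
  · simp only [h, decide_true, Bool.not_true]
    simp only [List.any_eq_false, PySem.List.count_eq]
    intro s _
    have := List.nodup_iff_count_le_one.mp h s
    simp only [decide_eq_true_eq]
    omega
  · simp only [h, decide_false, Bool.not_false]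
    rw [List.nodup_iff_count_le_one] at h
    simp only [not_forall, not_le] at h
    obtain ⟨a, ha⟩ := h
    have hmem : a ∈ l := List.count_pos_iff.mp (by omega)
    exact List.any_eq_true.mpr ⟨a, hmem, by simp [PySem.List.count_eq]; omega⟩

-- B's loop invariant: with a duplicate-free 'seen', it reports whether seen ++ (row sums) has a duplicate.
theorem fAltGo_eq (rows : List (List Int)) : ∀ (seen : List Int), seen.Nodup →
    fAltGo seen rows = !decide (seen ++ rows.map rsum).Nodup := by
  induction rows with
  | nil => intro seen h; simp [fAltGo, h]
  | cons row rest ih =>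
    intro seen h
    simp only [fAltGo, List.map_cons]
    by_cases hc : PySem.Set.contains seen (rsum row)
    · have hmem : rsum row ∈ seen := by simpa [PySem.Set.contains] using hc
      have hbad : ¬ (seen ++ rsum row :: rest.map rsum).Nodup := fun hn =>
        (List.disjoint_of_nodup_append hn) hmem List.mem_cons_self
      simp only [rsum] at hmem hbad ⊢
      simp [hmem, hbad]
    · have hnmem : rsum row ∉ seen := by simpa [PySem.Set.contains] using hc
      have hadd : PySem.Set.add seen (rsum row) = seen ++ [rsum row] := by
        simp [PySem.Set.add, PySem.Set.contains, hnmem]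
      have hnodup : (seen ++ [rsum row]).Nodup := by
        rw [List.nodup_append]
        refine ⟨h, List.nodup_singleton _, ?_⟩
        intro a ha b hb
        rw [List.mem_singleton] at hb
        subst hb
        exact fun e => hnmem (e ▸ ha)
      have hrec := ih _ hnodup
      rw [List.append_assoc, List.singleton_append] at hrec
      simp only [rsum] at hnmem hadd hrec ⊢
      simp [hnmem, hrec]

-- ===== VERDICT (by name: the statement is the Claim_ definition above) =====
theorem f_spec : Claim_equal_f := by
  intro arr2D _
  unfold Spec_f f f_alt
  rw [PySem.List.foldl_append_singleton_eq_map, List.nil_append, any_count_gt_one]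
  have h := fAltGo_eq arr2D PySem.Set.empty (by simp [PySem.Set.empty])
  have hr : rsum = List.foldl (fun s num => s + num) 0 := rfl
  rw [hr] at h
  rw [h]
  simp [PySem.Set.empty]
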